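-- pv_equiv track=rewrite | github.com/jonathanherzig/span-based-sp | preprocess/geo/create_template_split.py | make_template_split
-- ===== SOURCE A (Python) =====
-- def make_template_split(templates, len_train):
--
--     train_templated_examples = []
--     dev_templated_examples = []
--     train_freqs = []
--     dev_freqs = []
--
--     for template in templates:
--         if len(train_templated_examples) < len_train:
--             train_freqs.append(len(templates[template]))
--             for example in templates[template]:
--                 train_templated_examples.append(example[3])
--         else:
--             dev_freqs.append(len(templates[template]))
--             for example in templates[template]:
--                 dev_templated_examples.append(example[3])
--     return train_templated_examples, dev_templated_examples, train_freqs, dev_freqs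
-- ===== SOURCE B (Python) =====
-- def make_template_split(templates, len_train):
--     items = list(templates.items())
--     freqs = [len(v) for _, v in items]
--     prefix = []
--     acc = 0
--     for f in freqs:
--         prefix.append(acc)
--         acc += f
--     m = sum(1 for p in prefix if p < len_train)
--     train_templated_examples = [ex[3] for _, v in items[:m] for ex in v]
--     dev_templated_examples = [ex[3] for _, v in items[m:] for ex in v]
--     return train_templated_examples, dev_templated_examples, freqs[:m], freqs[m:]
-- ===== Notes on version B (the rewrite author's own statement) =====
-- stated objective: alternative
-- what changed: Instead of A's single interleaved pass that grows four lists while re-looking each key up in the dict, B first computes the frequency list and its prefix sums, finds the split index m (first template whose prior cumulative count reaches len_train), and then builds all four outputs by slicing and flat comprehensions.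
import Mathlib
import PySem

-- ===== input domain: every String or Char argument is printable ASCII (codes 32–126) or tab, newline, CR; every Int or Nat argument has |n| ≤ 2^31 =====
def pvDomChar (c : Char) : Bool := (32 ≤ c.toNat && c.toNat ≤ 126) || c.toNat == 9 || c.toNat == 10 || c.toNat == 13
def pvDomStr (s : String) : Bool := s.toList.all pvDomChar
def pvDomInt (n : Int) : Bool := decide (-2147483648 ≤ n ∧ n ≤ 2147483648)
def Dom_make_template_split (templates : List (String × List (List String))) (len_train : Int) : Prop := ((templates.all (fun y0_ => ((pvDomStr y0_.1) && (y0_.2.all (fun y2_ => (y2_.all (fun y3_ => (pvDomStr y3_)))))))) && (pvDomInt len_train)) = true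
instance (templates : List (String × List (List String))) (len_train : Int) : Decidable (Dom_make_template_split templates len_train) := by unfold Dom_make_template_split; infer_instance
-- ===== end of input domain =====

-- B replaces A's interleaved four-list partition pass by: frequency list, prefix sums,
-- split index m, then slicing/flattening (objective: alternative decomposition, same cost).

-- ===== PORT A =====
def make_template_split (templates : List (String × List (List String))) (len_train : Int) :
    List String × List String × List Int × List Int :=
  let st := templates.foldl (fun st kv =>
    -- templates[template] : dict lookup (KeyError impossible: key comes from the dict itself)
    let vs := ((PySem.Dict.mk templates).get? kv.1).getD []
    if (st.1.length : Int) < len_train then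
      -- train_freqs.append(len(...)); for example in ...: train_... .append(example[3])
      (vs.foldl (fun acc ex => acc ++ [(PySem.List.pyGet? ex 3).getD ""]) st.1,
       st.2.1, st.2.2.1 ++ [(vs.length : Int)], st.2.2.2)
    else
      (st.1,
       vs.foldl (fun acc ex => acc ++ [(PySem.List.pyGet? ex 3).getD ""]) st.2.1,
       st.2.2.1, st.2.2.2 ++ [(vs.length : Int)]))
    (([] : List String), ([] : List String), ([] : List Int), ([] : List Int))
  st

-- ===== PORT B =====
def make_template_split_alt (templates : List (String × List (List String))) (len_train : Int) :
    List String × List String × List Int × List Int :=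
  let items := templates
  let freqs := items.map (fun kv => (kv.2.length : Int))
  -- prefix = []; acc = 0; for f in freqs: prefix.append(acc); acc += f
  let pa := freqs.foldl (fun s f => (s.1 ++ [s.2], s.2 + f)) (([] : List Int), (0 : Int))
  let pre := pa.1
  -- m = sum(1 for p in prefix if p < len_train)
  let m : Int := ((pre.filter (fun p => decide (p < len_train))).length : Int)
  let train := (PySem.List.slice items none (some m)).flatMap
    (fun kv => kv.2.map (fun ex => (PySem.List.pyGet? ex 3).getD ""))
  let dev := (PySem.List.slice items (some m) none).flatMap
    (fun kv => kv.2.map (fun ex => (PySem.List.pyGet? ex 3).getD ""))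
  (train, dev, PySem.List.slice freqs none (some m), PySem.List.slice freqs (some m) none)

-- ===== PRECONDITION & SPEC =====
-- Pre_ excludes (a) inputs where A raises IndexError (some example with fewer than 4 fields:
-- example[3]) and (b) association lists with duplicate keys, which cannot arise from a Python dict.
def Pre_make_template_split (templates : List (String × List (List String))) (len_train : Int) : Prop :=
  (templates.map Prod.fst).Nodup ∧ ∀ kv ∈ templates, ∀ ex ∈ kv.2, 4 ≤ ex.length

instance (templates : List (String × List (List String))) (len_train : Int) : Decidable (Pre_make_template_split templates len_train) := by unfold Pre_make_template_split; infer_instance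

def pvWitness_make_template_split : (List (String × List (List String))) × Int :=
  ([("t1", [["a", "b", "c", "d"], ["a", "b", "c", "e"]]), ("t2", [["x", "y", "z", "w"]])], 2)

def Spec_make_template_split (templates : List (String × List (List String))) (len_train : Int)
    (out : List String × List String × List Int × List Int) : Prop :=
  out = make_template_split_alt templates len_train

instance (templates : List (String × List (List String))) (len_train : Int) (out : List String × List String × List Int × List Int) : Decidable (Spec_make_template_split templates len_train out) := by unfold Spec_make_template_split; infer_instance

-- ===== CLAIM =====
def Claim_equal_make_template_split : Prop := ∀ (templates : List (String × List (List String))) (len_train : Int), Dom_make_template_split templates len_train → Pre_make_template_split templates len_train → Spec_make_template_split templates len_train (make_template_split templates len_train)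

-- ===== LEMMAS AND PROOFS =====

-- example[3] getter shared by the statements of the proof lemmas
def pvGet3 (ex : List String) : String := (PySem.List.pyGet? ex 3).getD ""

def pvFlat (l : List (String × List (List String))) : List String :=
  l.flatMap (fun kv => kv.2.map pvGet3)

-- number of leading templates that go to train, as a function of the remaining budget r
def pvSplitIdx (r : Int) : List (String × List (List String)) → Nat
  | [] => 0
  | kv :: rest => if 0 < r then pvSplitIdx (r - kv.2.length) rest + 1 else 0

lemma pvSplitIdx_nonpos (r : Int) (h : r ≤ 0) (l : List (String × List (List String))) :
    pvSplitIdx r l = 0 := by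
  cases l with
  | nil => rfl
  | cons kv rest => simp [pvSplitIdx]; omega

-- A's loop body, with the dict lookup already resolved to the pair's own value
def pvStep (len_train : Int)
    (st : List String × List String × List Int × List Int)
    (kv : String × List (List String)) : List String × List String × List Int × List Int :=
  if (st.1.length : Int) < len_train then
    (st.1 ++ kv.2.map pvGet3, st.2.1, st.2.2.1 ++ [(kv.2.length : Int)], st.2.2.2)
  else
    (st.1, st.2.1 ++ kv.2.map pvGet3, st.2.2.1, st.2.2.2 ++ [(kv.2.length : Int)])

lemma pvFoldA (len_train : Int) (l : List (String × List (List String)))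
    (T D : List String) (TF DF : List Int) :
    l.foldl (pvStep len_train) (T, D, TF, DF) =
      (T ++ pvFlat (l.take (pvSplitIdx (len_train - T.length) l)),
       D ++ pvFlat (l.drop (pvSplitIdx (len_train - T.length) l)),
       TF ++ ((l.take (pvSplitIdx (len_train - T.length) l)).map (fun kv => (kv.2.length : Int))),
       DF ++ ((l.drop (pvSplitIdx (len_train - T.length) l)).map (fun kv => (kv.2.length : Int)))) := by
  induction l generalizing T D TF DF with
  | nil => simp [pvFlat]
  | cons kv rest ih =>
    by_cases h : (T.length : Int) < len_train
    · have h0 : 0 < len_train - T.length := by omega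
      simp only [List.foldl_cons, pvStep, if_pos h, pvSplitIdx, if_pos h0]
      rw [ih]
      have hlen : ((T ++ kv.2.map pvGet3).length : Int) = T.length + kv.2.length := by
        simp
      have harg : len_train - ((T ++ kv.2.map pvGet3).length : Int)
          = len_train - T.length - kv.2.length := by rw [hlen]; ring
      rw [harg]
      simp [pvFlat, List.flatMap_cons, List.append_assoc]
    · have h0 : ¬ 0 < len_train - T.length := by omega
      simp only [List.foldl_cons, pvStep, if_neg h, pvSplitIdx, if_neg h0]
      rw [ih]
      rw [pvSplitIdx_nonpos _ (by omega) rest]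
      simp [pvFlat, List.flatMap_cons, List.append_assoc]

-- prefix sums as a pure recursion, matching B's fold
def pvPrefixes (a : Int) : List Int → List Int
  | [] => []
  | f :: fs => a :: pvPrefixes (a + f) fs

lemma pvFoldPrefix (freqs : List Int) (P : List Int) (a : Int) :
    freqs.foldl (fun s f => (s.1 ++ [s.2], s.2 + f)) (P, a)
      = (P ++ pvPrefixes a freqs, a + freqs.sum) := by
  induction freqs generalizing P a with
  | nil => simp [pvPrefixes]
  | cons f fs ih =>
    simp only [List.foldl_cons, pvPrefixes, ih]
    simp [List.append_assoc]
    ring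

lemma pvCount_prefixes (len_train : Int) (l : List (String × List (List String))) (a : Int) :
    ((pvPrefixes a (l.map (fun kv => (kv.2.length : Int)))).filter
        (fun p => decide (p < len_train))).length
      = pvSplitIdx (len_train - a) l := by
  induction l generalizing a with
  | nil => simp [pvPrefixes, pvSplitIdx]
  | cons kv rest ih =>
    by_cases h : a < len_train
    · have h0 : 0 < len_train - a := by omega
      simp only [List.map_cons, pvPrefixes, List.filter_cons, decide_eq_true_eq, if_pos h,
        pvSplitIdx, if_pos h0, List.length_cons]
      rw [ih]
      congr 1
      ring_nf
    · have h0 : ¬ 0 < len_train - a := by omega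
      simp only [List.map_cons, pvPrefixes, List.filter_cons, decide_eq_true_eq, if_neg h,
        pvSplitIdx, if_neg h0]
      rw [ih, pvSplitIdx_nonpos]
      omega

-- A's lookup step equals pvStep on inputs satisfying Pre_
lemma pvStepA_eq (templates : List (String × List (List String))) (len_train : Int)
    (hnd : (templates.map Prod.fst).Nodup) :
    ∀ st (kv : String × List (List String)), kv ∈ templates →
      (let vs := ((PySem.Dict.mk templates).get? kv.1).getD []
       if (st.1.length : Int) < len_train then
         (vs.foldl (fun acc ex => acc ++ [(PySem.List.pyGet? ex 3).getD ""]) st.1,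
          st.2.1, st.2.2.1 ++ [(vs.length : Int)], st.2.2.2)
       else
         (st.1,
          vs.foldl (fun acc ex => acc ++ [(PySem.List.pyGet? ex 3).getD ""]) st.2.1,
          st.2.2.1, st.2.2.2 ++ [(vs.length : Int)]))
      = pvStep len_train st kv := by
  intro st kv hmem
  have hget : (PySem.Dict.mk templates).get? kv.1 = some kv.2 :=
    PySem.Dict.get?_of_mem_items (d := PySem.Dict.mk templates) hmem hnd
  simp only [hget, Option.getD_some, pvStep,
    PySem.List.foldl_append_singleton_eq_map]
  split <;> simp [pvGet3]

-- ===== VERDICT =====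
theorem make_template_split_spec : Claim_equal_make_template_split := by
  intro templates len_train _hdom hpre
  obtain ⟨hnd, _hex⟩ := hpre
  unfold Spec_make_template_split make_template_split make_template_split_alt
  have hA : templates.foldl (fun st kv =>
      let vs := ((PySem.Dict.mk templates).get? kv.1).getD []
      if (st.1.length : Int) < len_train then
        (vs.foldl (fun acc ex => acc ++ [(PySem.List.pyGet? ex 3).getD ""]) st.1,
         st.2.1, st.2.2.1 ++ [(vs.length : Int)], st.2.2.2)
      else
        (st.1,
         vs.foldl (fun acc ex => acc ++ [(PySem.List.pyGet? ex 3).getD ""]) st.2.1,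
         st.2.2.1, st.2.2.2 ++ [(vs.length : Int)]))
      (([] : List String), ([] : List String), ([] : List Int), ([] : List Int))
      = templates.foldl (pvStep len_train)
        (([] : List String), ([] : List String), ([] : List Int), ([] : List Int)) := by
    apply PySem.List.foldl_congr_mem
    intro acc x hx
    exact pvStepA_eq templates len_train hnd acc x hx
  rw [hA, pvFoldA]
  -- now the B side
  dsimp only
  rw [pvFoldPrefix]
  simp only [List.nil_append]
  set m := pvSplitIdx (len_train - ((([] : List String)).length : Int)) templates with hm
  have hcount : ((pvPrefixes 0 (templates.map (fun kv => (kv.2.length : Int)))).filter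
      (fun p => decide (p < len_train))).length = m := by
    rw [pvCount_prefixes]
    simp [hm]
  rw [hcount]
  have hsl1 : PySem.List.slice templates none (some (m : Int)) = templates.take m :=
    PySem.List.slice_to_natCast templates m
  have hsl2 : PySem.List.slice templates (some (m : Int)) none = templates.drop m :=
    PySem.List.slice_from_natCast templates m
  have hsl3 : PySem.List.slice (templates.map (fun kv => (kv.2.length : Int))) none (some (m : Int))
      = (templates.map (fun kv => (kv.2.length : Int))).take m :=
    PySem.List.slice_to_natCast _ m
  have hsl4 : PySem.List.slice (templates.map (fun kv => (kv.2.length : Int))) (some (m : Int)) none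
      = (templates.map (fun kv => (kv.2.length : Int))).drop m :=
    PySem.List.slice_from_natCast _ m
  rw [hsl1, hsl2, hsl3, hsl4]
  simp [pvFlat, List.map_take, List.map_drop, hm]
  exact ⟨rfl, rfl⟩
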